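-- pv_equiv track=rewrite | github.com/CSA86/CSA86 | Anuncia CPU roto.py | comprueba_si_suma_indica_rota
-- ===== SOURCE A (Python) =====
-- def calcula_binario(numero):
--     ejecutar = True
--     binario = []
--     while ejecutar:
--         binario.append(numero % 2)
--         numero = numero // 2
--         if numero == 0:
--             ejecutar = False
--     binario.reverse()
--     return binario
--
-- def calcula_suma(lista1, lista2):
--     for i in range(len(lista1)):
--         lista1[i] = lista1[i] + lista2[i]
--     return lista1
--
-- def comprueba_si_suma_indica_rota(original, posicion, actual, roto):
--     suma = original[0].copy()
--     for orden, caso in enumerate(original):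
--         if orden != posicion:
--             suma = calcula_suma(suma, caso)
--         else:
--             suma = calcula_suma(suma, actual)
--     for orden, caso in enumerate(suma):
--         suma[orden] = caso % 2
--     roto_en_binario = calcula_binario(roto)
--     if len(roto_en_binario) < len(original[-1]):
--         ceros_anadir = len(original[-1]) - len(roto_en_binario)
--         for i in range(ceros_anadir):
--             roto_en_binario.insert(0, 0)
--     if suma == roto_en_binario:
--         return True
--     else:
--         return False
-- ===== SOURCE B (Python) =====
-- def comprueba_si_suma_indica_rota(original, posicion, actual, roto):
--     n = len(original[0])
--     paridad = []
--     for j in range(n):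
--         s = original[0][j]
--         for i in range(len(original)):
--             fila = actual if i == posicion else original[i]
--             s += fila[j]
--         paridad.append(s % 2)
--     bits = [int(c) for c in format(roto, 'b')]
--     falta = len(original[-1]) - len(bits)
--     if falta > 0:
--         bits = [0] * falta + bits
--     return paridad == bits
-- ===== Notes on version B (the rewrite author's own statement) =====
-- stated objective: alternative
-- what changed: B computes the parity vector column-major with a per-column running sum (no list-of-sums accumulator, no calcula_suma helper) and obtains roto's binary digits via format(roto,'b') instead of the manual mod/div loop.
import Mathlib
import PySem

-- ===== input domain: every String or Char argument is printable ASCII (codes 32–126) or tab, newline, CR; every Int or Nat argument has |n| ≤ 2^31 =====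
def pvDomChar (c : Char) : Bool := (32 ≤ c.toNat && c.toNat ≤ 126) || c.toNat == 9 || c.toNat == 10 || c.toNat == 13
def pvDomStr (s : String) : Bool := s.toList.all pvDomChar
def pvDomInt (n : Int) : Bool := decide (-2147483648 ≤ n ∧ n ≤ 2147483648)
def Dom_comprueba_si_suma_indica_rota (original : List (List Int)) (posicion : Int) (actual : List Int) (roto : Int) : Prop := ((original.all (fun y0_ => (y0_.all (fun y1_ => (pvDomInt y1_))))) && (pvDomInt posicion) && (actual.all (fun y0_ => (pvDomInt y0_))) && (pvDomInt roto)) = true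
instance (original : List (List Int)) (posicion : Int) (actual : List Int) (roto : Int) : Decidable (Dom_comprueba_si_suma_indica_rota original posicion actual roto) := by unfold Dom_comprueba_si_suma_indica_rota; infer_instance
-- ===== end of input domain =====

-- B re-derives the parity vector column-major with a plain running sum and gets roto's binary
-- digits from format(roto,'b') instead of A's row-accumulator list and manual mod/div loop
-- (objective: alternative decomposition; neither program mutates its arguments).

-- ===== PORT A =====
-- A's while-loop in calcula_binario, fueled: for numero ≥ 0 (the only inputs on which the
-- Python loop terminates; Pre_ demands 0 ≤ roto) fuel numero.natAbs + 1 is enough, so the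
-- port is exact there.  numero < 0 makes Python diverge and is outside Pre_.
def calcBinAux : Nat → Int → List Int → List Int
  | 0, _, acc => acc
  | fuel + 1, n, acc =>
    let acc' := acc ++ [PySem.Int.mod n 2]
    let n' := PySem.Int.floordiv n 2
    if n' = 0 then acc' else calcBinAux fuel n' acc'

def calcula_binario (numero : Int) : List Int :=
  (calcBinAux (numero.natAbs + 1) numero []).reverse

-- lista1[i] = lista1[i] + lista2[i] for i in range(len(lista1)); exact when
-- len lista2 ≥ len lista1 (a shorter lista2 raises IndexError in Python — excluded by Pre_;
-- getD 0 merely totalizes the port there).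
def calcula_suma (l1 l2 : List Int) : List Int :=
  l1.mapIdx (fun i x => x + l2.getD i 0)

def comprueba_si_suma_indica_rota (original : List (List Int)) (posicion : Int) (actual : List Int) (roto : Int) : Bool :=
  -- original[0].copy(); empty original raises IndexError in Python (outside Pre_)
  let suma0 := original.headD []
  let suma1 := (PySem.List.enumerate original).foldl
      (fun s oc => if oc.1 ≠ posicion then calcula_suma s oc.2 else calcula_suma s actual) suma0
  let suma2 := suma1.map (fun c => PySem.Int.mod c 2)
  let rb := calcula_binario roto
  let lastLen := (original.getLast?.getD []).length   -- len(original[-1])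
  let rb2 := if rb.length < lastLen then List.replicate (lastLen - rb.length) 0 ++ rb else rb
  suma2 == rb2

-- ===== PORT B =====
-- digits of format(n,'b') for n > 0, MSB-first
def pyBitsAux (n : Nat) : List Int :=
  if h : n = 0 then [] else pyBitsAux (n / 2) ++ [((n % 2 : Nat) : Int)]
decreasing_by exact Nat.div_lt_self (Nat.pos_of_ne_zero h) (by norm_num)

-- [int(c) for c in format(roto,'b')]: binary digits MSB-first, [0] for roto = 0; a negative
-- roto makes B raise ValueError on the '-' character (outside Pre_).
def pyFormatBin (roto : Int) : List Int :=
  if roto = 0 then [0] else pyBitsAux roto.toNat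

def comprueba_si_suma_indica_rota_alt (original : List (List Int)) (posicion : Int) (actual : List Int) (roto : Int) : Bool :=
  let n := (original.headD []).length
  let paridad := (List.range n).map (fun j =>
    PySem.Int.mod
      ((List.range original.length).foldl
        (fun s (i : Nat) => s + (if (i : Int) = posicion then actual else original.getD i []).getD j 0)
        ((original.headD []).getD j 0)) 2)
  let bits := pyFormatBin roto
  let falta : Int := ((original.getLast?.getD []).length : Int) - (bits.length : Int)
  let bits2 := if falta > 0 then List.replicate falta.toNat 0 ++ bits else bits
  paridad == bits2

-- ===== PRECONDITION & SPEC =====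
-- Pre_ excludes exactly the inputs on which Python A does not return: empty original
-- (IndexError on original[0]), negative roto (calcula_binario loops forever), a row shorter
-- than original[0] (IndexError in calcula_suma), and — when posicion names a row — actual
-- shorter than original[0] (same IndexError).
def Pre_comprueba_si_suma_indica_rota (original : List (List Int)) (posicion : Int) (actual : List Int) (roto : Int) : Prop :=
  original ≠ [] ∧ 0 ≤ roto ∧
  (∀ fila ∈ original, (original.headD []).length ≤ fila.length) ∧
  (0 ≤ posicion → posicion < original.length → (original.headD []).length ≤ actual.length)

instance (original : List (List Int)) (posicion : Int) (actual : List Int) (roto : Int) : Decidable (Pre_comprueba_si_suma_indica_rota original posicion actual roto) := by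
  unfold Pre_comprueba_si_suma_indica_rota; infer_instance

def pvWitness_comprueba_si_suma_indica_rota : List (List Int) × Int × List Int × Int :=
  ([[1, 0], [0, 1], [1, 1]], 1, [0, 1], 2)

def Spec_comprueba_si_suma_indica_rota (original : List (List Int)) (posicion : Int) (actual : List Int) (roto : Int) (out : Bool) : Prop := out = comprueba_si_suma_indica_rota_alt original posicion actual roto
instance (original : List (List Int)) (posicion : Int) (actual : List Int) (roto : Int) (out : Bool) : Decidable (Spec_comprueba_si_suma_indica_rota original posicion actual roto out) := by unfold Spec_comprueba_si_suma_indica_rota; infer_instance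

-- ===== CLAIM (what is proved, stated in full; the proofs are below) =====
def Claim_equal_comprueba_si_suma_indica_rota : Prop := ∀ (original : List (List Int)) (posicion : Int) (actual : List Int) (roto : Int), Dom_comprueba_si_suma_indica_rota original posicion actual roto → Pre_comprueba_si_suma_indica_rota original posicion actual roto → Spec_comprueba_si_suma_indica_rota original posicion actual roto (comprueba_si_suma_indica_rota original posicion actual roto)

-- ===== LEMMAS AND PROOFS =====

theorem length_calcula_suma (l1 l2 : List Int) : (calcula_suma l1 l2).length = l1.length := by
  simp [calcula_suma]

theorem getD_calcula_suma (l1 l2 : List Int) (j : Nat) (h : j < l1.length) :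
    (calcula_suma l1 l2).getD j 0 = l1.getD j 0 + l2.getD j 0 := by
  rw [List.getD_eq_getElem _ _ (by simpa [calcula_suma] using h), List.getD_eq_getElem _ _ h]
  simp [calcula_suma]

theorem length_foldl_calcula_suma (L : List (List Int)) (s : List Int) :
    (L.foldl calcula_suma s).length = s.length := by
  induction L generalizing s with
  | nil => rfl
  | cons r L ih => simp only [List.foldl_cons]; rw [ih, length_calcula_suma]

theorem getD_foldl_calcula_suma (L : List (List Int)) (s : List Int) (j : Nat) (h : j < s.length) :
    (L.foldl calcula_suma s).getD j 0
      = L.foldl (fun a r => a + r.getD j 0) (s.getD j 0) := by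
  induction L generalizing s with
  | nil => rfl
  | cons r L ih =>
    simp only [List.foldl_cons]
    rw [ih _ (by rw [length_calcula_suma]; exact h), getD_calcula_suma _ _ _ h]

-- A's branching fold is a fold of calcula_suma over the substituted row list
theorem foldA_eq (original : List (List Int)) (posicion : Int) (actual : List Int) (s : List Int) :
    (PySem.List.enumerate original).foldl
        (fun s oc => if oc.1 ≠ posicion then calcula_suma s oc.2 else calcula_suma s actual) s
      = ((PySem.List.enumerate original).map
          (fun oc => if oc.1 ≠ posicion then oc.2 else actual)).foldl calcula_suma s := by
  rw [List.foldl_map]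
  congr 1
  funext s oc
  exact (apply_ite (calcula_suma s) _ _ _).symm

-- the substituted rows projected to column j, as B enumerates them
theorem rows_map_eq (original : List (List Int)) (posicion : Int) (actual : List Int) (j : Nat) :
    ((PySem.List.enumerate original).map (fun oc => if oc.1 ≠ posicion then oc.2 else actual)).map
        (fun r => r.getD j 0)
      = (List.range original.length).map
        (fun (i : Nat) => (if (i : Int) = posicion then actual else original.getD i []).getD j 0) := by
  apply List.ext_getElem
  · simp [PySem.List.length_enumerate]
  · intro k h1 h2
    simp only [List.getElem_map, List.getElem_range]
    have hk : k < original.length := by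
      simpa [PySem.List.length_enumerate] using h1
    rw [PySem.List.getElem_enumerate]
    by_cases hp : (k : Int) = posicion
    · simp [hp]
    · simp [hp, List.getElem?_eq_getElem hk]

theorem pyBitsAux_step (n : Nat) (hn : n ≠ 0) :
    pyBitsAux n = pyBitsAux (n / 2) ++ [((n % 2 : Nat) : Int)] := by
  rw [pyBitsAux]; simp [hn]

theorem calcBinAux_eq (fuel : Nat) : ∀ (n : Nat) (acc : List Int), 0 < n → n < 2 ^ fuel →
    calcBinAux fuel (n : Int) acc = acc ++ (pyBitsAux n).reverse := by
  induction fuel with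
  | zero => intro n acc h1 h2; omega
  | succ fuel ih =>
    intro n acc h1 h2
    have hmod : PySem.Int.mod (n : Int) 2 = ((n % 2 : Nat) : Int) := by
      rw [PySem.Int.mod_eq_emod_of_pos (by norm_num)]; omega
    have hdiv : PySem.Int.floordiv (n : Int) 2 = ((n / 2 : Nat) : Int) := by
      rw [PySem.Int.floordiv_eq_ediv_of_pos (by norm_num)]
      omega
    rw [calcBinAux]
    simp only [hmod, hdiv]
    by_cases hz : n / 2 = 0
    · have hn1 : n = 1 := by omega
      subst hn1
      rw [pyBitsAux_step 1 (by omega)]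
      simp [pyBitsAux]
    · rw [if_neg (by exact_mod_cast hz)]
      rw [ih (n / 2) _ (Nat.pos_of_ne_zero hz) (by
        have : 2 ^ (fuel + 1) = 2 * 2 ^ fuel := by ring
        omega)]
      rw [pyBitsAux_step n (by omega)]
      simp [List.append_assoc]

theorem calcula_binario_eq (roto : Int) (h : 0 ≤ roto) :
    calcula_binario roto = pyFormatBin roto := by
  by_cases hz : roto = 0
  · subst hz; decide
  · have hpos : 0 < roto.toNat := by omega
    have hr : (roto.toNat : Int) = roto := Int.toNat_of_nonneg h
    have habs : roto.natAbs = roto.toNat := by omega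
    rw [calcula_binario, habs, ← hr, Int.toNat_natCast,
      calcBinAux_eq _ _ _ hpos (lt_trans (Nat.lt_two_pow_self)
        (Nat.pow_lt_pow_right (by norm_num) (Nat.lt_succ_self _)))]
    simp [pyFormatBin, if_neg hz, hr]

-- the two parity vectors coincide (no precondition needed: both ports total via getD 0)
theorem parity_eq (original : List (List Int)) (posicion : Int) (actual : List Int) :
    ((PySem.List.enumerate original).foldl
        (fun s oc => if oc.1 ≠ posicion then calcula_suma s oc.2 else calcula_suma s actual)
        (original.headD [])).map (fun c => PySem.Int.mod c 2)
      = (List.range (original.headD []).length).map (fun j =>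
          PySem.Int.mod
            ((List.range original.length).foldl
              (fun s (i : Nat) => s + (if (i : Int) = posicion then actual else original.getD i []).getD j 0)
              ((original.headD []).getD j 0)) 2) := by
  rw [foldA_eq]
  apply List.ext_getElem
  · simp [length_foldl_calcula_suma]
  · intro j h1 h2
    have hj : j < (original.headD []).length := by
      simpa [length_foldl_calcula_suma] using h1
    simp only [List.getElem_map, List.getElem_range]
    congr 1
    rw [← List.getD_eq_getElem _ 0 (by simpa [length_foldl_calcula_suma] using h1)]
    rw [getD_foldl_calcula_suma _ _ _ hj]
    rw [PySem.List.foldl_add, PySem.List.foldl_add, rows_map_eq]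

theorem comprueba_main (original : List (List Int)) (posicion : Int) (actual : List Int) (roto : Int)
    (h : 0 ≤ roto) :
    comprueba_si_suma_indica_rota original posicion actual roto
      = comprueba_si_suma_indica_rota_alt original posicion actual roto := by
  simp only [comprueba_si_suma_indica_rota, comprueba_si_suma_indica_rota_alt]
  rw [parity_eq, calcula_binario_eq _ h]
  congr 1
  by_cases hlt : (pyFormatBin roto).length < (original.getLast?.getD []).length
  · rw [if_pos hlt, if_pos (by omega : ((original.getLast?.getD []).length : Int) - ((pyFormatBin roto).length : Int) > 0)]
    congr 1
    congr 1
    omega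
  · rw [if_neg hlt, if_neg (by omega : ¬ ((original.getLast?.getD []).length : Int) - ((pyFormatBin roto).length : Int) > 0)]

-- ===== VERDICT (by name: the statement is the Claim_ definition above) =====
theorem comprueba_si_suma_indica_rota_spec : Claim_equal_comprueba_si_suma_indica_rota := by
  intro original posicion actual roto _hdom hpre
  exact comprueba_main original posicion actual roto hpre.2.1
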